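-- pv_equiv track=rewrite | github.com/GianLMB/HiRE_optimization | Structure_DB_Amber_HiRE/Prep_pureHire/SCRIPTS/HiREtopology/parse_oldhirefile.py | create_respointers_mol
-- ===== SOURCE A (Python) =====
-- def create_respointers_mol(nmols,m_pfirst,m_pfinal,r_pfirst,r_pfinal):
--     m_rfirst = list()
--     m_rfinal = list()
--     for m_id in range(nmols):
--         start = m_pfirst[m_id]
--         end = m_pfinal[m_id]
--         for idx,(s,e) in enumerate(zip(r_pfirst,r_pfinal)):
--             if start==s:
--                 m_rfirst.append(idx+1)
--             if end==e:
--                 m_rfinal.append(idx+1)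
--     return m_rfirst,m_rfinal
-- ===== SOURCE B (Python) =====
-- def create_respointers_mol(nmols, m_pfirst, m_pfinal, r_pfirst, r_pfinal):
--     # One pass over the residues builds value -> [idx+1, ...] indexes,
--     # then each molecule is a pair of dictionary lookups.
--     first_index = {}
--     final_index = {}
--     for idx, (s, e) in enumerate(zip(r_pfirst, r_pfinal)):
--         first_index.setdefault(s, []).append(idx + 1)
--         final_index.setdefault(e, []).append(idx + 1)
--     m_rfirst = []
--     m_rfinal = []
--     for m_id in range(nmols):
--         m_rfirst += first_index.get(m_pfirst[m_id], [])
--         m_rfinal += final_index.get(m_pfinal[m_id], [])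
--     return m_rfirst, m_rfinal
-- ===== Notes on version B (the rewrite author's own statement) =====
-- stated objective: faster
-- what changed: B builds value-to-index-list dictionaries over the residue pointers in one pass and answers each molecule with two lookups, instead of A's full scan of all residues per molecule; intended as faster (O(nmols*nres) -> near-linear), measured 3.64x at the largest size both finished (output size itself can dominate on match-heavy inputs).
import Mathlib
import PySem

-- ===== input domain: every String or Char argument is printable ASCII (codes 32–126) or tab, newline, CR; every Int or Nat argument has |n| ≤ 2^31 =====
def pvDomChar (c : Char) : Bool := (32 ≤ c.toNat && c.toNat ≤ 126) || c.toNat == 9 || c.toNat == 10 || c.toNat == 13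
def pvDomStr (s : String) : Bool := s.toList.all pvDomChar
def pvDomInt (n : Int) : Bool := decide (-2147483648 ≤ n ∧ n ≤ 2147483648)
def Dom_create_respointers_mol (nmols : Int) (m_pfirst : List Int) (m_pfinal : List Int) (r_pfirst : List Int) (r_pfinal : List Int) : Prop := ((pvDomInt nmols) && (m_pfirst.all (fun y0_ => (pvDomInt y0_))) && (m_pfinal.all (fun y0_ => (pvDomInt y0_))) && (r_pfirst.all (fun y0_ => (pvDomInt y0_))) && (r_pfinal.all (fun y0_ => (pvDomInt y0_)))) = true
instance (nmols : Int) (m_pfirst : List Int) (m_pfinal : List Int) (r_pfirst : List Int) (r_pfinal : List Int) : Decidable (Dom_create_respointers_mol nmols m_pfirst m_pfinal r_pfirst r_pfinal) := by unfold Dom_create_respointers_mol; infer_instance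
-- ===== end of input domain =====

-- B replaces A's per-molecule scan of all residues by one-pass value→index-list dictionaries; intended as faster, measured 3.64× at the largest size both finished.
-- ===== PORT A =====
-- the body of A's inner residue loop (both 'if's of one iteration)
def crpStepA (start stop : Int) (acc2 : List Int × List Int) (p : Int × Int × Int) : List Int × List Int :=
  let acc2 := if start == p.2.1 then (acc2.1 ++ [p.1 + 1], acc2.2) else acc2
  if stop == p.2.2 then (acc2.1, acc2.2 ++ [p.1 + 1]) else acc2

def create_respointers_mol (nmols : Int) (m_pfirst : List Int) (m_pfinal : List Int) (r_pfirst : List Int) (r_pfinal : List Int) : List Int × List Int :=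
  (PySem.List.pyRange 0 nmols 1).foldl (fun (acc : List Int × List Int) m_id =>
    let start := PySem.List.pyGetD m_pfirst m_id 0
    let stop := PySem.List.pyGetD m_pfinal m_id 0
    (PySem.List.enumerate (r_pfirst.zip r_pfinal)).foldl (crpStepA start stop) acc) ([], [])

-- ===== PORT B =====
def create_respointers_mol_alt (nmols : Int) (m_pfirst : List Int) (m_pfinal : List Int) (r_pfirst : List Int) (r_pfinal : List Int) : List Int × List Int :=
  let zipped := PySem.List.enumerate (r_pfirst.zip r_pfinal)
  -- setdefault(k, []).append(idx+1) is Dict.modify k [] (· ++ [idx+1])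
  let firstIndex := zipped.foldl (fun d p => d.modify p.2.1 [] (fun l => l ++ [p.1 + 1])) PySem.Dict.empty
  let finalIndex := zipped.foldl (fun d p => d.modify p.2.2 [] (fun l => l ++ [p.1 + 1])) PySem.Dict.empty
  (PySem.List.pyRange 0 nmols 1).foldl (fun (acc : List Int × List Int) m_id =>
    (acc.1 ++ firstIndex.getD (PySem.List.pyGetD m_pfirst m_id 0) [],
     acc.2 ++ finalIndex.getD (PySem.List.pyGetD m_pfinal m_id 0) [])) ([], [])

-- ===== PRECONDITION & SPEC =====
-- Pre_ excludes exactly the inputs where A raises IndexError (a molecule index beyond a pointer list); B raises there too.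
def Pre_create_respointers_mol (nmols : Int) (m_pfirst : List Int) (m_pfinal : List Int) (r_pfirst : List Int) (r_pfinal : List Int) : Prop :=
  nmols ≤ (m_pfirst.length : Int) ∧ nmols ≤ (m_pfinal.length : Int)
instance (nmols : Int) (m_pfirst : List Int) (m_pfinal : List Int) (r_pfirst : List Int) (r_pfinal : List Int) : Decidable (Pre_create_respointers_mol nmols m_pfirst m_pfinal r_pfirst r_pfinal) := by unfold Pre_create_respointers_mol; infer_instance
def pvWitness_create_respointers_mol : Int × List Int × List Int × List Int × List Int := (2, [1, 4], [3, 6], [1, 4], [3, 6])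
def Spec_create_respointers_mol (nmols : Int) (m_pfirst : List Int) (m_pfinal : List Int) (r_pfirst : List Int) (r_pfinal : List Int) (out : List Int × List Int) : Prop := out = create_respointers_mol_alt nmols m_pfirst m_pfinal r_pfirst r_pfinal
instance (nmols : Int) (m_pfirst : List Int) (m_pfinal : List Int) (r_pfirst : List Int) (r_pfinal : List Int) (out : List Int × List Int) : Decidable (Spec_create_respointers_mol nmols m_pfirst m_pfinal r_pfirst r_pfinal out) := by unfold Spec_create_respointers_mol; infer_instance

-- ===== CLAIM (what is proved, stated in full; the proofs are below) =====
def Claim_equal_create_respointers_mol : Prop := ∀ (nmols : Int) (m_pfirst : List Int) (m_pfinal : List Int) (r_pfirst : List Int) (r_pfinal : List Int), Dom_create_respointers_mol nmols m_pfirst m_pfinal r_pfirst r_pfinal → Pre_create_respointers_mol nmols m_pfirst m_pfinal r_pfirst r_pfinal → Spec_create_respointers_mol nmols m_pfirst m_pfinal r_pfirst r_pfinal (create_respointers_mol nmols m_pfirst m_pfinal r_pfirst r_pfinal)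

-- ===== LEMMAS AND PROOFS =====

-- the dictionary built by repeated modify-append, looked up at x, is the filtered index list
theorem crp_dict_getD (f : Int × Int × Int → Int) :
    ∀ (l : List (Int × Int × Int)) (d : PySem.Dict Int (List Int)) (x : Int),
    (l.foldl (fun d p => d.modify (f p) [] (fun s => s ++ [p.1 + 1])) d).getD x []
      = d.getD x [] ++ (l.filter (fun p => x == f p)).map (fun p => p.1 + 1) := by
  intro l
  induction l with
  | nil => simp
  | cons p t ih =>
    intro d x
    simp only [List.foldl_cons, ih, List.filter_cons]
    by_cases h : x = f p
    · simp [h]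
    · simp [PySem.Dict.getD_modify, h]

-- A's inner residue scan appends exactly the two filtered index lists
theorem crp_inner (start stop : Int) :
    ∀ (l : List (Int × Int × Int)) (acc : List Int × List Int),
    l.foldl (crpStepA start stop) acc
      = (acc.1 ++ (l.filter (fun p => start == p.2.1)).map (fun p => p.1 + 1),
         acc.2 ++ (l.filter (fun p => stop == p.2.2)).map (fun p => p.1 + 1)) := by
  intro l
  induction l with
  | nil => simp
  | cons p t ih =>
    intro acc
    rw [List.foldl_cons, ih]
    by_cases h1 : start == p.2.1 <;> by_cases h2 : stop == p.2.2 <;>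
      simp [crpStepA, h1, h2]

theorem crp_eq (nmols : Int) (m_pfirst : List Int) (m_pfinal : List Int) (r_pfirst : List Int) (r_pfinal : List Int) :
    create_respointers_mol nmols m_pfirst m_pfinal r_pfirst r_pfinal
      = create_respointers_mol_alt nmols m_pfirst m_pfinal r_pfirst r_pfinal := by
  unfold create_respointers_mol create_respointers_mol_alt
  apply PySem.List.foldl_congr_mem
  intro acc m_id _
  simp only [crp_inner, crp_dict_getD (fun p => p.2.1), crp_dict_getD (fun p => p.2.2),
    PySem.Dict.getD_empty, List.nil_append]

-- ===== VERDICT (by name: the statement is the Claim_ definition above) =====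
theorem create_respointers_mol_spec : Claim_equal_create_respointers_mol := by
  intro nmols m_pfirst m_pfinal r_pfirst r_pfinal _ _
  exact crp_eq nmols m_pfirst m_pfinal r_pfirst r_pfinal
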